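-- pv_equiv track=rewrite | github.com/nathanturk2/Puzzles | 5-words/5-words.py | find_limit
-- ===== SOURCE A (Python) =====
-- def find_limit(total):
--     c=0
--     i=0
--     while i<=25 and c<2:
--         if (1<<(25-i))&total==0:
--             c+=1
--         i+=1
--     return i-1
-- ===== SOURCE B (Python) =====
-- def find_limit(total):
--     s = format(total & 0x3FFFFFF, '026b')
--     first = s.find('0')
--     if first == -1:
--         return 25
--     second = s.find('0', first + 1)
--     return second if second != -1 else 25
-- ===== Notes on version B (the rewrite author's own statement) =====
-- stated objective: idiomatic
-- what changed: Replaces the per-bit shift-mask-and-count while loop by formatting the masked value as a fixed-width binary string and locating the first and second '0' with str.find.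
import Mathlib
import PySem

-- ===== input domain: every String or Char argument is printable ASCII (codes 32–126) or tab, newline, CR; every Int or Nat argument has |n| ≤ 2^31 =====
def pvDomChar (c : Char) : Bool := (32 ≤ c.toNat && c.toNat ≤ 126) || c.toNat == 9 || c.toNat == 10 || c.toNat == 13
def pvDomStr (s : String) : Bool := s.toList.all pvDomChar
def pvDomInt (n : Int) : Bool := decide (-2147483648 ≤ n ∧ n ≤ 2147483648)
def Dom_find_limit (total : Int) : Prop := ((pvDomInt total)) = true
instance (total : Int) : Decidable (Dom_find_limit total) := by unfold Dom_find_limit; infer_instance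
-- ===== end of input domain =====

-- B replaces A's shift-mask-and-count while loop by a binary-string rendering searched with find (objective: idiomatic).

-- ===== PORT A =====
-- while i<=25 and c<2: …  (the shift amount 25-i is nonnegative whenever the branch is taken, since i ≤ 25 there)
def find_limit.go (total i c : Int) : Int :=
  if i ≤ 25 ∧ c < 2 then
    find_limit.go total (i + 1) (if PySem.Int.band ((1:Int) <<< (25 - i).toNat) total = 0 then c + 1 else c)
  else i - 1
termination_by (26 - i).toNat
decreasing_by omega

def find_limit (total : Int) : Int := find_limit.go total 0 0

-- ===== PORT B =====
-- hand port of format(m, '026b') for 0 ≤ m < 2^26 (exact there): character j of the string is bit 25-j of m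
def find_limit_alt (total : Int) : Int :=
  let m := PySem.Int.band total 67108863
  let s : List Char := (List.range 26).map (fun j : Nat => if PySem.Int.band (m >>> (25 - j)) 1 = 1 then '1' else '0')
  let first := PySem.Chars.find s ['0']
  if first = -1 then 25
  else
    let second := PySem.Chars.findFrom s ['0'] (first + 1)
    if second ≠ -1 then second else 25

-- ===== PRECONDITION & SPEC =====
def Spec_find_limit (total : Int) (out : Int) : Prop := out = find_limit_alt total
instance (total : Int) (out : Int) : Decidable (Spec_find_limit total out) := by unfold Spec_find_limit; infer_instance

-- ===== CLAIM (what is proved, stated in full; the proofs are below) =====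
def Claim_equal_find_limit : Prop := ∀ (total : Int), Dom_find_limit total → Spec_find_limit total (find_limit total)

-- ===== LEMMAS AND PROOFS =====

-- the low 26 bits of total, as a Nat
def lowBits (t : Int) : Nat := (t % 67108864).toNat

-- string index j (0 ≤ j ≤ 25) carries a zero bit
def zflag (n : Nat) (j : Nat) : Bool := ! n.testBit (25 - j)

def bitsList (t : Int) : List Bool := (List.range 26).map (zflag (lowBits t))

-- abstract form of A's loop over the remaining zero-flags
def goL : List Bool → Int → Int → Int
  | [], i, _ => i - 1
  | b :: bs, i, c => if c < 2 then goL bs (i + 1) (if b then c + 1 else c) else i - 1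

lemma mask_toNat : (67108863 : Int).toNat = 2^26 - 1 := by decide

-- Python's  total & 0x3FFFFFF  is the residue of total mod 2^26
lemma band_mask (t : Int) : PySem.Int.band t 67108863 = t % 67108864 := by
  rcases le_or_gt 0 t with h | h
  · rw [PySem.Int.band_of_nonneg h (by norm_num), mask_toNat,
      Nat.and_two_pow_sub_one_eq_mod]
    omega
  · simp only [PySem.Int.band, if_neg (by omega : ¬ (0:Int) ≤ t), if_pos (by norm_num : (0:Int) ≤ 67108863)]
    rw [mask_toNat, Nat.and_comm, Nat.and_two_pow_sub_one_eq_mod]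
    have h2 : ((-t - 1).toNat : Int) = -t - 1 := by omega
    have h3 : (-t-1).toNat % 2^26 < 2^26 := Nat.mod_lt _ (by norm_num)
    have h4 : (((-t-1).toNat % 2^26 : Nat) : Int) = (-t-1) % 67108864 := by
      push_cast [h2]; norm_num
    omega

-- A's bit test, in terms of the low 26 bits
lemma band_two_pow_eq_zero_iff (t : Int) (k : Nat) (hk : k < 26) :
    (PySem.Int.band ((1:Int) <<< k) t = 0) ↔ (lowBits t).testBit k = false := by
  have hsl : ((1:Int) <<< k) = ((2^k : Nat) : Int) := by simp [Int.shiftLeft_eq]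
  have hlt : (2:Nat)^k < 2^26 := Nat.pow_lt_pow_right (by norm_num) hk
  have h1 : ((2^k : Nat) : Int).toNat = 2^k := Int.toNat_natCast _
  rw [hsl]
  rcases le_or_gt 0 t with h | h
  · rw [PySem.Int.band_of_nonneg (by positivity) h, h1, Nat.two_pow_and]
    have hlow : lowBits t = t.toNat % 2^26 := by unfold lowBits; omega
    rw [hlow, Nat.testBit_mod_two_pow]
    cases hb : t.toNat.testBit k <;> simp [hk]
  · simp only [PySem.Int.band, if_pos (by positivity : (0:Int) ≤ ((2^k:Nat):Int)),
      if_neg (by omega : ¬ (0:Int) ≤ t)]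
    rw [h1, Nat.two_pow_and]
    set u := (-t - 1).toNat with hu
    have h2 : (u:Int) = -t - 1 := by omega
    have h3 : u % 2^26 < 2^26 := Nat.mod_lt _ (by norm_num)
    have hlow : lowBits t = 2^26 - (u % 2^26 + 1) := by
      unfold lowBits
      have h4 : ((u % 2^26 : Nat) : Int) = (-t-1) % 67108864 := by
        push_cast [h2]; norm_num
      omega
    rw [hlow, Nat.testBit_two_pow_sub_succ h3, Nat.testBit_mod_two_pow]
    cases hb : u.testBit k <;> simp [hk]

lemma prefix_singleton_iff (c : Char) (l : List Char) : [c] <+: l ↔ l.head? = some c := by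
  cases l with
  | nil => simp
  | cons a l =>
    simp only [List.cons_prefix_cons, List.head?_cons, Option.some.injEq]
    constructor
    · rintro ⟨rfl, -⟩; rfl
    · rintro rfl; exact ⟨rfl, List.nil_prefix⟩

lemma prefix_singleton_drop_iff (c : Char) (l : List Char) (j : Nat) :
    [c] <+: l.drop j ↔ l[j]? = some c := by
  rw [prefix_singleton_iff, List.head?_drop]

lemma infix_singleton_iff (c : Char) (l : List Char) : [c] <:+: l ↔ c ∈ l := by
  constructor
  · intro h; exact h.mem (by simp)
  · intro h
    obtain ⟨pre, suf, rfl⟩ := List.mem_iff_append.mp h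
    exact ⟨pre, suf, by simp⟩

-- single-character find is the first index holding that character
lemma find_singleton (l : List Char) (c : Char) :
    PySem.Chars.find l [c] = (l.findIdx? (· == c)).elim (-1) (fun f => (f : Int)) := by
  cases hf : l.findIdx? (· == c) with
  | none =>
    have hmem : c ∉ l := by
      intro hc
      have := List.findIdx?_eq_none_iff.mp hf c hc
      simp at this
    simp [(PySem.Chars.find_eq_neg_one_iff l [c]).mpr (fun h => hmem ((infix_singleton_iff c l).mp h))]
  | some f =>
    obtain ⟨hflen, hfc, hmin⟩ := List.findIdx?_eq_some_iff_getElem.mp hf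
    have hc : l[f] = c := by simpa using hfc
    have hmem : c ∈ l := hc ▸ List.getElem_mem hflen
    have hnn : 0 ≤ PySem.Chars.find l [c] :=
      (PySem.Chars.find_nonneg_iff l [c]).mpr ((infix_singleton_iff c l).mpr hmem)
    obtain ⟨hpre, hminF⟩ := PySem.Chars.find_spec hnn
    set F := PySem.Chars.find l [c] with hF
    have hFl : l[F.toNat]? = some c := (prefix_singleton_drop_iff c l F.toNat).mp hpre
    obtain ⟨hFlen, hFc⟩ := List.getElem?_eq_some_iff.mp hFl
    have heq : F.toNat = f := by
      rcases lt_trichotomy F.toNat f with hlt | he | hgt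
      · exact absurd (by simp [hFc] : (l[F.toNat] == c) = true) (hmin F.toNat hlt)
      · exact he
      · exact absurd ((prefix_singleton_drop_iff c l f).mpr (by simp [hflen, hc]))
          (hminF f hgt)
    have : F = (f : Int) := by omega
    simp [this]

lemma goL_two (bs : List Bool) (i : Int) : goL bs i 2 = i - 1 := by
  cases bs <;> simp [goL]

lemma goL_one (bs : List Bool) (i : Int) :
    goL bs i 1 = (bs.findIdx? id).elim ((i + bs.length) - 1) (fun f => i + f) := by
  induction bs generalizing i with
  | nil => simp [goL]
  | cons b bs ih =>
    cases b
    · simp [goL, List.findIdx?_cons, ih]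
      cases h : bs.findIdx? id <;> simp <;> ring
    · simp [goL, List.findIdx?_cons, goL_two]

lemma goL_zero (bs : List Bool) (i : Int) :
    goL bs i 0 = (bs.findIdx? id).elim ((i + bs.length) - 1)
      (fun f => goL (bs.drop (f + 1)) (i + f + 1) 1) := by
  induction bs generalizing i with
  | nil => simp [goL]
  | cons b bs ih =>
    cases b
    · simp [goL, List.findIdx?_cons, ih]
      cases h : bs.findIdx? id <;> simp
      · ring
      · congr 1; ring
    · simp [goL, List.findIdx?_cons, goL_one]

-- A's loop, started at Nat index k, is goL over the remaining zero-flags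
lemma go_eq_goL (t : Int) (n k : Nat) (hk : k + n = 26) (c : Int) :
    find_limit.go t (k : Int) c = goL ((List.range' k n).map (zflag (lowBits t))) (k : Int) c := by
  induction n generalizing k c with
  | zero =>
    rw [find_limit.go]
    have hnot : ¬ ((k : Int) ≤ 25 ∧ c < 2) := by omega
    simp only [if_neg hnot]
    simp [goL]
  | succ n ih =>
    rw [find_limit.go, List.range'_succ]
    have hk25 : (k : Int) ≤ 25 := by omega
    have htn : (25 - (k : Int)).toNat = 25 - k := by omega
    have hcond : (PySem.Int.band ((1:Int) <<< (25 - (k:Int)).toNat) t = 0) ↔ zflag (lowBits t) k = true := by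
      rw [htn, band_two_pow_eq_zero_iff t (25 - k) (by omega), zflag]
      cases h : (lowBits t).testBit (25 - k) <;> simp
    by_cases hc : c < 2
    · rw [if_pos (And.intro hk25 hc), List.map_cons]
      simp only [goL, if_pos hc]
      have hcast : (k : Int) + 1 = ((k + 1 : Nat) : Int) := by push_cast; ring
      rw [hcast, ih (k + 1) (by omega)]
      congr 1
      by_cases hz : zflag (lowBits t) k = true
      · rw [if_pos (hcond.mpr hz), hz, if_pos rfl]
      · rw [if_neg (fun hh => hz (hcond.mp hh)), if_neg (by simpa using hz)]
    · rw [if_neg (by omega : ¬ ((k:Int) ≤ 25 ∧ c < 2)), List.map_cons]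
      simp only [goL, if_neg hc]

lemma charOf_comp :
    ((fun x => x == '0') ∘ fun b : Bool => if b = true then '0' else '1') = id := by
  funext b; cases b <;> decide

theorem find_limit_spec : Claim_equal_find_limit := by
  intro t _
  unfold Spec_find_limit find_limit find_limit_alt
  dsimp only
  -- the rendered string is the zero-flag list, as characters
  have hm : PySem.Int.band t 67108863 = ((lowBits t : Nat) : Int) := by
    rw [band_mask]
    have := Int.emod_nonneg t (by norm_num : (67108864:Int) ≠ 0)
    unfold lowBits; omega
  have hchar : ∀ j : Nat,
      (if PySem.Int.band (PySem.Int.band t 67108863 >>> (25 - j)) 1 = 1 then '1' else '0')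
        = (if zflag (lowBits t) j then '0' else '1') := by
    intro j
    have hsr : ((lowBits t : Nat) : Int) >>> (25 - j) = ((lowBits t >>> (25 - j) : Nat) : Int) := by
      simp [Int.shiftRight_eq_div_pow]
    have hb : PySem.Int.band ((lowBits t >>> (25 - j) : Nat) : Int) 1
        = ((lowBits t >>> (25 - j) &&& 1 : Nat) : Int) := by
      exact_mod_cast PySem.Int.band_natCast (lowBits t >>> (25 - j)) 1
    rw [hm, hsr, hb]
    have htb : (lowBits t).testBit (25 - j) = decide ((lowBits t) / 2^(25-j) % 2 = 1) :=
      Nat.testBit_eq_decide_div_mod_eq ..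
    rw [Nat.and_one_is_mod, Nat.shiftRight_eq_div_pow]
    unfold zflag
    rw [htb]
    by_cases hd : (lowBits t) / 2^(25-j) % 2 = 1
    · simp [hd]
    · have : ¬ ((lowBits t) / 2^(25-j) % 2 : Int) = 1 := by exact_mod_cast hd
      simp [hd, this]
  have hs : (List.range 26).map
      (fun j : Nat => if PySem.Int.band (PySem.Int.band t 67108863 >>> (25 - j)) 1 = 1 then '1' else '0')
      = (bitsList t).map (fun b => if b then '0' else '1') := by
    unfold bitsList
    rw [List.map_map]
    exact List.map_congr_left (fun j _ => by
      rw [hchar j]; cases h : zflag (lowBits t) j <;> simp [h])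
  rw [hs]
  -- both find and the loop are governed by findIdx? on the flags
  have hlen : (bitsList t).length = 26 := by simp [bitsList]
  have hfind : ∀ l : List Bool,
      PySem.Chars.find (l.map (fun b => if b then '0' else '1')) ['0']
        = (l.findIdx? id).elim (-1) (fun f => (f : Int)) := by
    intro l
    rw [find_singleton, List.findIdx?_map, charOf_comp]
  have hA : find_limit.go t 0 0 = goL (bitsList t) 0 0 := by
    have := go_eq_goL t 26 0 rfl 0
    simpa [bitsList, List.range_eq_range'] using this
  rw [hA, goL_zero, hfind (bitsList t)]
  cases hf : (bitsList t).findIdx? id with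
  | none => simp [hlen]
  | some f =>
    have hflt : f < 26 := by
      have := (List.findIdx?_eq_some_iff_getElem.mp hf).choose_spec
      have hl := (List.findIdx?_eq_some_iff_getElem.mp hf).choose
      omega
    simp only [Option.elim]
    have hne : ((f : Int)) ≠ -1 := by omega
    rw [if_neg hne]
    have hlen2 : f + 1 ≤ ((bitsList t).map (fun b => if b then '0' else '1')).length := by
      simp [hlen]; omega
    have hcast : (f : Int) + 1 = ((f + 1 : Nat) : Int) := by push_cast; ring
    rw [hcast, PySem.Chars.findFrom_natCast _ ['0'] (f+1) hlen2, ← List.map_drop, hfind]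
    rw [goL_one]
    cases hg : ((bitsList t).drop (f+1)).findIdx? id with
    | none => simp [hlen]; omega
    | some j =>
      have : ¬ (((j : Nat) : Int) = -1) := by omega
      simp only [Option.elim]
      rw [if_neg this]
      have : ((f+1 : Nat) : Int) + (j:Nat) ≠ -1 := by omega
      rw [if_pos (by omega : ((f+1 : Nat) : Int) + (j:Nat) ≠ -1)]
      push_cast; ring
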